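-- pv_equiv track=rewrite | github.com/mattdoug604/Rosalind | 4_textbook_track/3B_MedianString.py | findMedianMotif
-- ===== SOURCE A (Python) =====
-- import itertools
--
-- def countMedian(kmers, motifs, k):
--     # compare possible k-mer to each found k-mer, nucleotide-by-nucleotide
--     # and keep the minimum value for each along that particular string.s
--     for old in motifs:
--         temp = k    # k is the maximum possible value
--         for new in kmers:
--             diff = 0
--             for nt in range(k):
--                 if new[nt] != old[nt]:
--                     diff += 1
--
--             if diff < temp:
--                 temp = diff
--
--         motifs[old] += temp
--     return motifs
--
-- def findMedianMotif(strings, k):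
--     ## Start with dictionary of all possible k-mers (value for each k-mer starts at 0)
--     motifs = {''.join(nt) : 0 for nt in itertools.product(['A','C','T','G'], repeat=k)}
--
--     ## Find all k-mers in each string...
--     for seq in strings:
--         kmers = []
--         for i in range(len(seq)-k+1):
--             kmers.append(seq[i:i+k])
--
--         ## Find the min for each k-mer and return an updated dictionary of values
--         motifs = countMedian(kmers, motifs, k)
--
--     return motifs
-- ===== SOURCE B (Python) =====
-- def findMedianMotif(strings, k):
--     # Trie DFS over candidate k-mers with an explicit stack: instead of
--     # re-scoring every candidate against every window from scratch, walk the
--     # 4-ary trie of candidates once, threading per-window partial mismatch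
--     # counts (count, remaining window suffix); each trie edge extends every
--     # count by one comparison, so candidates sharing a prefix share that
--     # prefix's comparison work.
--     wins = [[s[i:i + k] for i in range(len(s) - k + 1)] for s in strings]
--     out = {}
--     stack = [('', k, [[(0, w) for w in ws] for ws in wins])]
--     while stack:
--         prefix, m, state = stack.pop()
--         if m <= 0:
--             out[prefix] = sum((min(c for c, _ in cs) if cs else k) for cs in state)
--         else:
--             for ch in 'GTCA':  # pushed reversed so pops visit A, C, T, G
--                 stack.append((prefix + ch, m - 1,
--                               [[(c + (suf[0] != ch), suf[1:]) for c, suf in cs]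
--                                for cs in state]))
--     return out
-- ===== Notes on version B (the rewrite author's own statement) =====
-- stated objective: alternative
-- what changed: B replaces A's triple loop (every candidate rescored against every window with k fresh character comparisons) by a single DFS over the 4-ary trie of candidate k-mers that threads per-window partial mismatch counts, so candidates sharing a prefix share that prefix's comparison work.
import Mathlib
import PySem

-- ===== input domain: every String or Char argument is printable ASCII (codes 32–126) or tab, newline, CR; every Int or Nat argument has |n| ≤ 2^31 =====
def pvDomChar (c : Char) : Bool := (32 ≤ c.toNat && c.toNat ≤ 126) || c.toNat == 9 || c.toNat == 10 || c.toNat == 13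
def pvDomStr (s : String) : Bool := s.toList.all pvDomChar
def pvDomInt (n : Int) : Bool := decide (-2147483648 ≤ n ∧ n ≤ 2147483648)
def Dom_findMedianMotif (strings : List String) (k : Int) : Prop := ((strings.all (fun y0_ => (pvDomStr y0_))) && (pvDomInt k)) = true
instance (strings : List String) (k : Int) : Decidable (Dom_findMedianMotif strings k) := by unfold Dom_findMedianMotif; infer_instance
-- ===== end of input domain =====

-- B walks the candidate trie once (explicit stack) with incremental per-window
-- mismatch counts instead of rescoring every candidate against every window
-- (objective: alternative).


-- ===== PORT A =====

-- itertools.product(['A','C','T','G'], repeat=n) with ''.join, as lists of chars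
-- (exact: product yields tuples with the first coordinate varying slowest).
def candA : Nat → List (List Char)
  | 0 => [[]]
  | n + 1 => ['A', 'C', 'T', 'G'].flatMap (fun c => (candA n).map (fun cs => c :: cs))

-- inner 'for nt in range(k)' loop computing diff (indices always in range:
-- both strings have length k on every call A makes)
def diffA (neww old : String) (k : Int) : Int :=
  (PySem.List.pyRange 0 k 1).foldl
    (fun diff nt => if PySem.Str.pyGet? neww nt ≠ PySem.Str.pyGet? old nt then diff + 1 else diff) 0

-- 'temp = k; for new in kmers: … if diff < temp: temp = diff'
def tempA (kmers : List String) (old : String) (k : Int) : Int :=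
  kmers.foldl (fun temp neww => let d := diffA neww old k; if d < temp then d else temp) k

-- countMedian: 'for old in motifs: … motifs[old] += temp' (iterates the key list,
-- which in-place value updates do not change)
def countMedianA (kmers : List String) (motifs : PySem.Dict String Int) (k : Int) :
    PySem.Dict String Int :=
  motifs.keys.foldl (fun d old => d.modify old 0 (· + tempA kmers old k)) motifs

-- 'for i in range(len(seq)-k+1): kmers.append(seq[i:i+k])'  (slice is exact per PySem.List.slice)
def kmersA (seq : String) (k : Int) : List String :=
  (PySem.List.pyRange 0 (PySem.Str.len seq - k + 1) 1).foldl
    (fun acc i => acc ++ [String.ofList (PySem.List.slice seq.toList (some i) (some (i + k)))]) []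

def findMedianMotif (strings : List String) (k : Int) : List (String × Int) :=
  let motifs0 : PySem.Dict String Int :=
    PySem.Dict.ofList ((candA k.toNat).map (fun cs => (String.ofList cs, (0 : Int))))
  (strings.foldl (fun motifs seq => countMedianA (kmersA seq k) motifs k) motifs0).items

-- ===== PORT B =====

-- [[s[i:i+k] for i in range(len(s)-k+1)] for s in strings], windows as char lists
def winsB (s : String) (k : Int) : List (List Char) :=
  (PySem.List.pyRange 0 (PySem.Str.len s - k + 1) 1).map
    (fun i => PySem.List.slice s.toList (some i) (some (i + k)))

-- leaf: sum((min(c for c, _ in cs) if cs else k) for cs in state)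
def leafB (k : Int) (state : List (List (Int × List Char))) : Int :=
  (state.map (fun cs => if cs.isEmpty then k
    else (PySem.List.min? (cs.map Prod.fst) (fun x => x)).getD 0)).sum

-- weight of a frame of depth m: total number of pops its subtree causes
-- (termination measure for the stack loop below)
def wB : Nat → Nat
  | 0 => 1
  | m + 1 => 1 + 4 * wB m

-- the 'while stack' loop.  Python's stack top (list end, append/pop) is the
-- HEAD of the Lean list, so pushing 'GTCA' and popping from the end is
-- prepending the children in order A, C, T, G.  The dict out collects pairwise
-- distinct keys (the prefixes at the leaves), so in insertion order it is
-- exactly the pop-order list of pairs.  Python's 'm <= 0' leaf test and suf[0]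
-- are ported with m : Nat (the initial frame carries k.toNat, children m - 1)
-- and headD: on every frame B makes the suffixes in state have length m, so
-- for m ≥ 1 the default is never used (exact there).
def stackB (k : Int) : List (List Char × Nat × List (List (Int × List Char))) → List (String × Int)
  | [] => []
  | (pre, 0, state) :: rest => (String.ofList pre, leafB k state) :: stackB k rest
  | (pre, m + 1, state) :: rest =>
      stackB k ((['A', 'C', 'T', 'G'].map (fun ch =>
        (pre ++ [ch], m, state.map (fun cs => cs.map (fun p =>
          (p.1 + (if p.2.headD ' ' ≠ ch then 1 else 0), p.2.tail)))))) ++ rest)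
  termination_by st => (st.map (fun e => wB e.2.1)).sum
  decreasing_by
    · simp [wB]
    · simp [wB]
      omega

def findMedianMotif_alt (strings : List String) (k : Int) : List (String × Int) :=
  stackB k [([], k.toNat, strings.map (fun s => (winsB s k).map (fun w => ((0 : Int), w))))]

-- ===== PRECONDITION & SPEC =====

-- Pre_ excludes k < 0, on which A raises ValueError (itertools.product with repeat < 0).
def Pre_findMedianMotif (strings : List String) (k : Int) : Prop := 0 ≤ k
instance (strings : List String) (k : Int) : Decidable (Pre_findMedianMotif strings k) := by
  unfold Pre_findMedianMotif; infer_instance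

def pvWitness_findMedianMotif : List String × Int := (["ACGTC", "GGA"], 2)

def Spec_findMedianMotif (strings : List String) (k : Int) (out : List (String × Int)) : Prop :=
  out = findMedianMotif_alt strings k
instance (strings : List String) (k : Int) (out : List (String × Int)) :
    Decidable (Spec_findMedianMotif strings k out) := by unfold Spec_findMedianMotif; infer_instance

-- ===== CLAIM (what is proved, stated in full; the proofs are below) =====
def Claim_equal_findMedianMotif : Prop := ∀ (strings : List String) (k : Int),
  Dom_findMedianMotif strings k → Pre_findMedianMotif strings k →
  Spec_findMedianMotif strings k (findMedianMotif strings k)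

-- ===== LEMMAS AND PROOFS =====

-- Hamming distance as a zip count; both programs' per-window scores reduce to it.
def hamB (cand w : List Char) : Int :=
  ((cand.zip w).countP (fun p => !(p.1 == p.2)) : Int)

theorem length_of_mem_candA {n : Nat} {cs : List Char} (h : cs ∈ candA n) : cs.length = n := by
  induction n generalizing cs with
  | zero => simp [candA] at h; simp [h]
  | succ n ih =>
    rw [candA] at h
    simp only [List.mem_flatMap, List.mem_map] at h
    obtain ⟨c, -, cs', hcs', rfl⟩ := h
    simp [ih hcs']

theorem nodup_candA (n : Nat) : (candA n).Nodup := by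
  induction n with
  | zero => simp [candA]
  | succ n ih =>
    rw [candA, List.nodup_flatMap]
    refine ⟨fun c _ => ih.map (fun a b h => by injection h), ?_⟩
    have hdisj : ∀ c c' : Char, c ≠ c' →
        List.Disjoint ((candA n).map (fun cs => c :: cs)) ((candA n).map (fun cs => c' :: cs)) := by
      intro c c' hne x hx hx'
      simp only [List.mem_map] at hx hx'
      obtain ⟨a, -, rfl⟩ := hx
      obtain ⟨b, -, hb⟩ := hx'
      exact hne (by injection hb with h1 h2; exact h1.symm)
    have hp : List.Pairwise (· ≠ ·) ['A', 'C', 'T', 'G'] := by decide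
    exact hp.imp (fun {a b} h => hdisj a b h)

-- dict facts ---------------------------------------------------------------

theorem getD_foldl_modify (g : String → Int → Int) (m : List String) (hm : m.Nodup)
    (d : PySem.Dict String Int) (c : String) :
    (m.foldl (fun d old => d.modify old 0 (g old)) d).getD c 0
      = if c ∈ m then g c (d.getD c 0) else d.getD c 0 := by
  induction m generalizing d with
  | nil => simp
  | cons old m ih =>
    rw [List.foldl_cons, ih (List.nodup_cons.mp hm).2]
    rcases eq_or_ne c old with rfl | hne
    · have : c ∉ m := (List.nodup_cons.mp hm).1
      simp [this]
    · by_cases hcm : c ∈ m <;> simp [hcm, hne, PySem.Dict.getD_modify]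

theorem keys_foldl_modify_of_mem (g : String → Int → Int) (m : List String)
    (d : PySem.Dict String Int) (hmem : ∀ old ∈ m, old ∈ d.keys) :
    (m.foldl (fun d old => d.modify old 0 (g old)) d).keys = d.keys := by
  induction m generalizing d with
  | nil => rfl
  | cons old m ih =>
    have hold : d.contains old = true :=
      (PySem.Dict.contains_iff_mem_keys d old).mpr (hmem old (by simp))
    have hk : (d.modify old 0 (g old)).keys = d.keys := by
      rw [PySem.Dict.keys_modify, PySem.Dict.keys_insert_of_contains _ _ hold]
    rw [List.foldl_cons, ih _ (by intro x hx; rw [hk]; exact hmem x (by simp [hx]))]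
    exact hk

theorem keys_countMedianA (kmers : List String) (d : PySem.Dict String Int) (k : Int) :
    (countMedianA kmers d k).keys = d.keys :=
  keys_foldl_modify_of_mem _ _ _ (fun _ h => h)

theorem getD_countMedianA (kmers : List String) (d : PySem.Dict String Int) (k : Int)
    (hnd : d.keys.Nodup) (c : String) (hc : c ∈ d.keys) :
    (countMedianA kmers d k).getD c 0 = d.getD c 0 + tempA kmers c k := by
  rw [countMedianA, getD_foldl_modify _ _ hnd, if_pos hc]

theorem getD_outer_fold (strings : List String) (k : Int) (d : PySem.Dict String Int)
    (hnd : d.keys.Nodup) (c : String) (hc : c ∈ d.keys) :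
    (strings.foldl (fun motifs seq => countMedianA (kmersA seq k) motifs k) d).getD c 0
      = strings.foldl (fun acc s => acc + tempA (kmersA s k) c k) (d.getD c 0) := by
  induction strings generalizing d with
  | nil => rfl
  | cons s strings ih =>
    rw [List.foldl_cons, List.foldl_cons,
      ih _ (by rw [keys_countMedianA]; exact hnd) (by rw [keys_countMedianA]; exact hc),
      getD_countMedianA _ _ _ hnd c hc]

theorem keys_outer_fold (strings : List String) (k : Int) (d : PySem.Dict String Int) :
    (strings.foldl (fun motifs seq => countMedianA (kmersA seq k) motifs k) d).keys = d.keys := by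
  induction strings generalizing d with
  | nil => rfl
  | cons s strings ih => rw [List.foldl_cons, ih, keys_countMedianA]

-- the initial dict -----------------------------------------------------------

theorem nodup_keys_strings (n : Nat) : ((candA n).map String.ofList).Nodup :=
  (nodup_candA n).map (fun a b h => by
    have := congrArg String.toList h; simpa using this)

theorem items_motifs0 (n : Nat) :
    (PySem.Dict.ofList ((candA n).map (fun cs => (String.ofList cs, (0 : Int))))).items
      = (candA n).map (fun cs => (String.ofList cs, (0 : Int))) := by
  have h := PySem.Dict.items_foldl_insert_fresh (candA n)
    (fun cs => String.ofList cs) (fun _ => (0 : Int)) PySem.Dict.empty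
    (fun a _ => by simp [PySem.Dict.contains_empty]) (nodup_keys_strings n)
  simpa [PySem.Dict.ofList, PySem.Dict.update, List.foldl_map] using h

-- counting mismatches: A's index form = the zip form ------------------------

theorem countMismatch (n : Nat) (u w : List Char) (hu : u.length = n) (hw : w.length = n) :
    (List.range n).countP (fun i => !((w[i]?) == (u[i]?)))
      = (u.zip w).countP (fun p => !(p.1 == p.2)) := by
  induction n generalizing u w with
  | zero =>
    rw [List.length_eq_zero_iff] at hu hw
    subst hu; subst hw; simp
  | succ n ih =>
    obtain ⟨a, u', rfl⟩ := List.exists_cons_of_length_eq_add_one hu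
    obtain ⟨b, w', rfl⟩ := List.exists_cons_of_length_eq_add_one hw
    rw [List.range_succ_eq_map, List.countP_cons, List.countP_map]
    simp only [List.zip_cons_cons, List.countP_cons]
    have hih := ih u' w' (by simpa using hu) (by simpa using hw)
    simp only [List.getElem?_cons_succ, List.getElem?_cons_zero, Function.comp_def]
    rw [hih]
    have hab : (!((some b) == (some a))) = (!(a == b)) := by
      simp [eq_comm]
    simp only [hab]

theorem diffA_eq_hamB (n : Nat) (u w : List Char) (hu : u.length = n) (hw : w.length = n) :
    diffA (String.ofList w) (String.ofList u) (n : Int) = hamB u w := by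
  rw [diffA, hamB]
  have hfun : (fun (diff : Int) (nt : Int) =>
        if PySem.Str.pyGet? (String.ofList w) nt ≠ PySem.Str.pyGet? (String.ofList u) nt
        then diff + 1 else diff)
      = (fun (diff : Int) (nt : Int) =>
        if (fun nt => !(PySem.List.pyGet? w nt == PySem.List.pyGet? u nt)) nt = true
        then diff + 1 else diff) := by
    funext diff nt
    simp [PySem.Str.pyGet?]
  rw [hfun, PySem.List.foldl_count_if, PySem.List.pyRange_one]
  rw [List.countP_map]
  have hpred : ((fun nt => !(PySem.List.pyGet? w nt == PySem.List.pyGet? u nt)) ∘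
        fun (j : Nat) => (0 : Int) + (j : Int))
      = (fun (i : Nat) => !((w[i]?) == (u[i]?))) := by
    funext i
    simp [PySem.List.pyGet?_natCast]
  rw [hpred]
  have hn : ((n : Int) - 0).toNat = n := by omega
  rw [hn, countMismatch n u w hu hw]
  simp

-- hamB on a cons, and hamB with the empty candidate --------------------------

theorem hamB_nil (w : List Char) : hamB [] w = 0 := rfl

theorem hamB_cons (ch s0 : Char) (e rest : List Char) :
    hamB (ch :: e) (s0 :: rest) = (if s0 ≠ ch then 1 else 0) + hamB e rest := by
  rw [hamB, hamB, List.zip_cons_cons, List.countP_cons]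
  rcases eq_or_ne s0 ch with rfl | hne
  · simp
  · have : (!(ch == s0)) = true := by simp [Ne.symm hne]
    simp [hne, this]
    omega

-- the running strict min is min(...) clipped at k ------------------------------

theorem minfoldA (ds : List Int) (k : Int) (hle : ∀ d ∈ ds, d ≤ k) :
    ds.foldl (fun t d => if d < t then d else t) k
      = (PySem.List.min? ds (fun x => x)).getD k := by
  cases ds with
  | nil => rfl
  | cons x t =>
    rw [PySem.List.min?_id_cons]
    have hstep : (fun (t : Int) (d : Int) => if d < t then d else t) = min := by
      funext a b
      rcases lt_or_ge b a with h | h <;> simp [min_def] <;> omega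
    have hx : x ≤ k := hle x (by simp)
    have h1 : (if x < k then x else k) = x := by split_ifs <;> omega
    rw [List.foldl_cons, hstep]
    show List.foldl min (if x < k then x else k) t = _
    rw [h1]
    rfl

-- the per-string window lists --------------------------------------------------

theorem length_mem_winsB (s : String) (n : Nat) (w : List Char)
    (hw : w ∈ winsB s (n : Int)) : w.length = n := by
  rw [winsB, List.mem_map] at hw
  obtain ⟨i, hi, rfl⟩ := hw
  rw [PySem.List.mem_pyRange_one, PySem.Str.len_eq] at hi
  obtain ⟨h0, hlt⟩ := hi
  have hj : i = ((i.toNat : Nat) : Int) := (Int.toNat_of_nonneg h0).symm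
  rw [hj, PySem.List.slice_natCast_add]
  simp only [List.length_take, List.length_drop]
  omega

theorem kmersA_eq (s : String) (k : Int) :
    kmersA s k = (winsB s k).map String.ofList := by
  rw [kmersA, winsB, PySem.List.foldl_append_singleton_eq_map, List.map_map]
  rfl

-- proof-only abbreviation: what the stack loop emits for one frame
def emitB (k : Int) (m : Nat) (pre : List Char)
    (state : List (List (Int × List Char))) : List (String × Int) :=
  (candA m).map (fun e =>
    (String.ofList (pre ++ e),
      (state.map (fun cs => if cs.isEmpty then k
        else (PySem.List.min? (cs.map (fun p => p.1 + hamB e p.2))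
                (fun x => x)).getD 0)).sum))

-- one child's emission, folded back into the parent's state
theorem emitB_child (k : Int) (m : Nat) (pre : List Char)
    (state : List (List (Int × List Char))) (ch : Char)
    (hlen : ∀ cs ∈ state, ∀ p ∈ cs, p.2.length = m + 1) :
    emitB k m (pre ++ [ch])
        (state.map (fun cs => cs.map (fun p =>
          (p.1 + (if p.2.headD ' ' ≠ ch then 1 else 0), p.2.tail))))
      = (candA m).map (fun e =>
          (String.ofList (pre ++ ch :: e),
            (state.map (fun cs => if cs.isEmpty then k
              else (PySem.List.min? (cs.map (fun p => p.1 + hamB (ch :: e) p.2))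
                      (fun x => x)).getD 0)).sum)) := by
  apply List.map_congr_left
  intro e _
  refine Prod.ext (by simp) ?_
  simp only
  congr 1
  rw [List.map_map]
  apply List.map_congr_left
  intro cs hcs
  have hemp : (cs.map (fun p =>
      (p.1 + (if p.2.headD ' ' ≠ ch then 1 else 0), p.2.tail))).isEmpty = cs.isEmpty := by
    cases cs <;> rfl
  rw [Function.comp_apply, hemp]
  by_cases h : cs.isEmpty
  · simp [h]
  · simp only [h]
    have hmap : cs.map ((fun p => p.1 + hamB e p.2) ∘ fun p =>
          (p.1 + if p.2.headD ' ' ≠ ch then 1 else 0, p.2.tail))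
        = cs.map (fun p => p.1 + hamB (ch :: e) p.2) := by
      apply List.map_congr_left
      intro p hp
      have hl : p.2.length = m + 1 := hlen cs hcs p hp
      obtain ⟨s0, rest, hsuf⟩ := List.exists_cons_of_length_eq_add_one hl
      simp only [Function.comp_apply, hsuf, List.headD_cons, List.tail_cons, hamB_cons]
      ring
    rw [List.map_map, hmap]

-- the stack-loop characterisation: popping one frame emits, in candA order,
-- each extension e of its prefix paired with the sum over strings of (k if no
-- windows, else the min over windows of accumulated count + remaining Hamming
-- distance of e to the suffix), then continues with the rest of the stack.
theorem stackB_cons (k : Int) (m : Nat) (pre : List Char)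
    (state : List (List (Int × List Char)))
    (rest : List (List Char × Nat × List (List (Int × List Char))))
    (hlen : ∀ cs ∈ state, ∀ p ∈ cs, p.2.length = m) :
    stackB k ((pre, m, state) :: rest) = emitB k m pre state ++ stackB k rest := by
  induction m generalizing pre state rest with
  | zero =>
    rw [stackB, emitB]
    simp only [candA, List.map_cons, List.map_nil, List.append_nil, leafB, List.cons_append,
      List.nil_append]
    refine List.cons_eq_cons.mpr ⟨?_, rfl⟩
    refine Prod.ext rfl ?_
    simp only
    congr 1
    apply List.map_congr_left
    intro cs _
    have h : cs.map (fun p => p.1 + hamB [] p.2) = cs.map Prod.fst :=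
      List.map_congr_left (fun p _ => by simp [hamB_nil])
    rw [← h]
  | succ m ih =>
    have hchild : ∀ ch : Char,
        ∀ cs ∈ state.map (fun cs => cs.map (fun p =>
            (p.1 + (if p.2.headD ' ' ≠ ch then 1 else 0), p.2.tail))),
          ∀ p ∈ cs, p.2.length = m := by
      intro ch cs hcs p hp
      rw [List.mem_map] at hcs
      obtain ⟨cs0, hcs0, rfl⟩ := hcs
      rw [List.mem_map] at hp
      obtain ⟨p0, hp0, rfl⟩ := hp
      have := hlen cs0 hcs0 p0 hp0
      simp only [List.length_tail, this]
      omega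
    rw [stackB]
    simp only [List.map_cons, List.map_nil, List.cons_append, List.nil_append]
    rw [ih _ _ _ (hchild 'A'), ih _ _ _ (hchild 'C'), ih _ _ _ (hchild 'T'), ih _ _ _ (hchild 'G')]
    rw [emitB_child k m pre state 'A' hlen, emitB_child k m pre state 'C' hlen,
      emitB_child k m pre state 'T' hlen, emitB_child k m pre state 'G' hlen]
    rw [emitB]
    show _ = (candA (m + 1)).map _ ++ _
    rw [candA]
    simp [List.flatMap_cons, List.map_map, Function.comp_def, List.append_assoc]

-- per-candidate totals on A's side ----------------------------------------------

theorem tempA_eq (n : Nat) (s : String) (e : List Char) (he : e.length = n) :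
    tempA (kmersA s (n : Int)) (String.ofList e) (n : Int)
      = if (winsB s (n : Int)).isEmpty then (n : Int)
        else (PySem.List.min? ((winsB s (n : Int)).map (fun w => (0 : Int) + hamB e w))
                (fun x => x)).getD 0 := by
  rw [tempA, kmersA_eq, List.foldl_map]
  have hfold : (winsB s (n : Int)).foldl
        (fun temp w => let d := diffA (String.ofList w) (String.ofList e) (n : Int)
          if d < temp then d else temp) ((n : Nat) : Int)
      = (winsB s (n : Int)).foldl
        (fun temp w => if hamB e w < temp then hamB e w else temp) ((n : Nat) : Int) := by
    apply PySem.List.foldl_congr_mem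
    intro acc w hw
    rw [diffA_eq_hamB n e w he (length_mem_winsB s n w hw)]
  rw [hfold]
  rw [← List.foldl_map (f := fun w => hamB e w)
    (g := fun (t d : Int) => if d < t then d else t)]
  rw [minfoldA _ _ (by
    intro d hd
    rw [List.mem_map] at hd
    obtain ⟨w, hw, rfl⟩ := hd
    have h1 : (e.zip w).countP (fun p => !(p.1 == p.2)) ≤ (e.zip w).length :=
      List.countP_le_length
    have h2 : (e.zip w).length = n := by
      rw [List.length_zip, he, length_mem_winsB s n w hw]; omega
    rw [hamB]; omega)]
  cases hws : winsB s (n : Int) with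
  | nil => rfl
  | cons w ws =>
    simp only [List.isEmpty_cons, List.map_cons, Bool.false_eq_true, if_false]
    rw [PySem.List.min?_id_cons, PySem.List.min?_id_cons]
    simp [List.foldl_map]

-- ===== VERDICT (by name: the statement is the Claim_ definition above) =====
theorem findMedianMotif_spec : Claim_equal_findMedianMotif := by
  intro strings k _ hpre
  unfold Spec_findMedianMotif findMedianMotif findMedianMotif_alt
  set n := k.toNat with hn
  have hk : ((n : Nat) : Int) = k := Int.toNat_of_nonneg hpre
  set pairs := (candA n).map (fun cs => (String.ofList cs, (0 : Int))) with hpairs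
  set m0 := PySem.Dict.ofList pairs with hm0
  have hitems0 : m0.items = pairs := items_motifs0 n
  have hkeys0 : m0.keys = (candA n).map String.ofList := by
    show m0.items.map Prod.fst = _
    rw [hitems0, hpairs, List.map_map]
    rfl
  have hnd0 : m0.keys.Nodup := by rw [hkeys0]; exact nodup_keys_strings n
  set F := strings.foldl (fun motifs seq => countMedianA (kmersA seq k) motifs k) m0 with hF
  have hkeysF : F.keys = m0.keys := keys_outer_fold strings k m0
  have hndF : F.keys.Nodup := by rw [hkeysF]; exact hnd0
  rw [PySem.Dict.items_eq_map_keys F hndF 0, hkeysF, hkeys0, List.map_map]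
  rw [stackB_cons k n [] _ [] (by
    intro cs hcs p hp
    rw [List.mem_map] at hcs
    obtain ⟨s, hs, rfl⟩ := hcs
    rw [List.mem_map] at hp
    obtain ⟨w, hw, rfl⟩ := hp
    rw [← hk] at hw
    exact length_mem_winsB s n w hw)]
  rw [stackB, List.append_nil, emitB]
  apply List.map_congr_left
  intro cs hcs
  have hmem : String.ofList cs ∈ m0.keys := by
    rw [hkeys0]; exact List.mem_map_of_mem hcs
  have hg0 : m0.getD (String.ofList cs) 0 = 0 := by
    apply PySem.Dict.getD_of_mem_items m0 _ hnd0
    rw [hitems0, hpairs]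
    exact List.mem_map_of_mem hcs
  have hgF : F.getD (String.ofList cs) 0
      = strings.foldl (fun acc s => acc + tempA (kmersA s k) (String.ofList cs) k) 0 := by
    rw [hF, getD_outer_fold strings k m0 hnd0 _ hmem, hg0]
  refine Prod.ext (by simp) ?_
  simp only [Function.comp_apply, hgF]
  rw [PySem.List.foldl_add, zero_add, List.map_map]
  congr 1
  apply List.map_congr_left
  intro s _
  rw [Function.comp_apply, ← hk, tempA_eq n s cs (length_of_mem_candA hcs)]
  cases winsB s (n : Int) <;> simp [Function.comp_def]
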